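-- pv_equiv track=rewrite | github.com/cmaceves/contamination_work | gmm.py | find_closest_sum
-- ===== SOURCE A (Python) =====
-- from itertools import permutations
--
-- def find_closest_sum(numbers, target, n):
--     permlist = list(permutations(numbers, n))
--     sumlist = [sum(l) for l in permlist]
--
--     maxpos = 0
--     for i in range(1, len(sumlist)):
--         if abs(sumlist[i] - target) < abs(sumlist[maxpos]-target):
--              maxpos = i
--
--     return permlist[maxpos]
-- ===== SOURCE B (Python) =====
-- from itertools import combinations
--
-- def find_closest_sum(numbers, target, n):
--     best = None
--     for c in combinations(numbers, n):
--         d = abs(sum(c) - target)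
--         if best is None or d < best[0]:
--             best = (d, c)
--     return best[1]
-- ===== Notes on version B (the rewrite author's own statement) =====
-- stated objective: faster
-- what changed: B iterates over the C(m,n) combinations with a single running best instead of materialising all P(m,n)=C(m,n)*n! permutations and re-scanning the sum list by index; the first optimal permutation in itertools order is always the index-sorted one, i.e. a combination.
import Mathlib
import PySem

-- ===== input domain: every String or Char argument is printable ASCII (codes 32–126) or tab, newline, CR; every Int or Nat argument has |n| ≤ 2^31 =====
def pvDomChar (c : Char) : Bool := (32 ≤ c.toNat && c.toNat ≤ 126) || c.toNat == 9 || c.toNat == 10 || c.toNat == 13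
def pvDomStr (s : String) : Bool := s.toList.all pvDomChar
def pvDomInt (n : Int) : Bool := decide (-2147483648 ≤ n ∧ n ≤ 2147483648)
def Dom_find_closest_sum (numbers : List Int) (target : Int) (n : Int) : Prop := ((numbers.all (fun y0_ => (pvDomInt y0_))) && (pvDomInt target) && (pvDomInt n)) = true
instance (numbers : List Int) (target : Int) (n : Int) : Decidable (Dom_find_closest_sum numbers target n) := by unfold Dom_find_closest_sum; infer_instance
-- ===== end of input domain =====

-- B replaces A's materialised scan of all n-permutations by a one-pass running best over the
-- n-combinations (the first optimal permutation is always the index-sorted one, i.e. a combination).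

-- ===== PORT A =====
-- itertools.permutations(xs, r): element tuples in lexicographic index order
def pickEach : List Int → List (Int × List Int)
  | [] => []
  | x :: xs => (x, xs) :: (pickEach xs).map (fun p => (p.1, x :: p.2))

def pyPerms : List Int → Nat → List (List Int)
  | _, 0 => [[]]
  | xs, r+1 => (pickEach xs).flatMap (fun p => (pyPerms p.2 r).map (p.1 :: ·))

def find_closest_sum (numbers : List Int) (target : Int) (n : Int) : List Int :=
  let permlist := pyPerms numbers n.toNat
  let sumlist := permlist.map List.sum
  let maxpos := (PySem.List.pyRange 1 (sumlist.length : Int) 1).foldl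
      (fun maxpos i =>
        if |PySem.List.pyGetD sumlist i 0 - target| < |PySem.List.pyGetD sumlist maxpos 0 - target|
        then i else maxpos) 0
  PySem.List.pyGetD permlist maxpos []

-- ===== PORT B =====
-- itertools.combinations(xs, r): sublist tuples in lexicographic index order
def pyCombs : List Int → Nat → List (List Int)
  | _, 0 => [[]]
  | [], _+1 => []
  | x :: xs, r+1 => (pyCombs xs r).map (x :: ·) ++ pyCombs xs (r+1)

def bstep (target : Int) (best : Option (Int × List Int)) (c : List Int) : Option (Int × List Int) :=
  let d := |c.sum - target|
  match best with
  | none => some (d, c)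
  | some (bd, bc) => if d < bd then some (d, c) else some (bd, bc)

def find_closest_sum_alt (numbers : List Int) (target : Int) (n : Int) : List Int :=
  match (pyCombs numbers n.toNat).foldl (bstep target) none with
  | some (_, c) => c
  | none => []

-- ===== PRECONDITION & SPEC =====
-- Pre_ excludes exactly the inputs where the Python raises: n < 0 (ValueError from
-- itertools) and n > len(numbers) (A indexes into an empty permutation list; B subscripts None).
def Pre_find_closest_sum (numbers : List Int) (target : Int) (n : Int) : Prop :=
  0 ≤ n ∧ n ≤ (numbers.length : Int)
instance (numbers : List Int) (target : Int) (n : Int) : Decidable (Pre_find_closest_sum numbers target n) := by unfold Pre_find_closest_sum; infer_instance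

def pvWitness_find_closest_sum : List Int × Int × Int := ([1, 2, 3], 4, 2)

def Spec_find_closest_sum (numbers : List Int) (target : Int) (n : Int) (out : List Int) : Prop := out = find_closest_sum_alt numbers target n
instance (numbers : List Int) (target : Int) (n : Int) (out : List Int) : Decidable (Spec_find_closest_sum numbers target n out) := by unfold Spec_find_closest_sum; infer_instance

-- ===== CLAIM (what is proved, stated in full; the proofs are below) =====
def Claim_equal_find_closest_sum : Prop := ∀ (numbers : List Int) (target : Int) (n : Int), Dom_find_closest_sum numbers target n → Pre_find_closest_sum numbers target n → Spec_find_closest_sum numbers target n (find_closest_sum numbers target n)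

-- ===== LEMMAS AND PROOFS =====

-- first strict minimiser of |sum - t|, carried as (distance, list)
def fminP (t d : Int) (b : List Int) : List (List Int) → Int × List Int
  | [] => (d, b)
  | c :: cs => if |c.sum - t| < d then fminP t |c.sum - t| c cs else fminP t d b cs

theorem fminP_nil (t d : Int) (b : List Int) : fminP t d b [] = (d, b) := rfl
theorem fminP_cons (t d : Int) (b c : List Int) (cs : List (List Int)) :
    fminP t d b (c :: cs) =
      if |c.sum - t| < d then fminP t |c.sum - t| c cs else fminP t d b cs := rfl

-- Cov s P C: C is obtained from P by dropping elements whose sum already occurred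
-- (in an earlier kept element or in the ambient seen-set s)
inductive Cov : List Int → List (List Int) → List (List Int) → Prop
  | nil (s : List Int) : Cov s [] []
  | keep (s : List Int) (p : List Int) (P C : List (List Int)) :
      Cov (p.sum :: s) P C → Cov s (p :: P) (p :: C)
  | skip (s : List Int) (p : List Int) (P C : List (List Int)) :
      p.sum ∈ s → Cov s P C → Cov s (p :: P) C

theorem cov_mono {s s' : List Int} {P C : List (List Int)}
    (h : Cov s P C) (hsub : ∀ v ∈ s, v ∈ s') : Cov s' P C := by
  induction h generalizing s' with
  | nil => exact Cov.nil s'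
  | keep s p P C _ ih =>
      refine Cov.keep _ _ _ _ (ih ?_)
      intro v hv
      rcases List.mem_cons.mp hv with h1 | h2
      · exact h1 ▸ List.mem_cons_self
      · exact List.mem_cons_of_mem _ (hsub _ h2)
  | skip s p P C hm _ ih =>
      exact Cov.skip _ _ _ _ (hsub _ hm) (ih hsub)

theorem cov_append {s : List Int} {P1 C1 P2 C2 : List (List Int)}
    (h1 : Cov s P1 C1) (h2 : Cov (C1.map List.sum ++ s) P2 C2) :
    Cov s (P1 ++ P2) (C1 ++ C2) := by
  induction h1 with
  | nil => simpa using h2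
  | keep s p P C _ ih =>
      refine Cov.keep _ _ _ _ (ih (cov_mono h2 ?_))
      intro v hv
      simp only [List.map_cons, List.mem_cons, List.mem_append] at hv ⊢
      tauto
  | skip s p P C hm _ ih =>
      exact Cov.skip _ _ _ _ hm (ih h2)

theorem cov_skipAll {s : List Int} {P : List (List Int)}
    (h : ∀ p ∈ P, p.sum ∈ s) : Cov s P [] := by
  induction P with
  | nil => exact Cov.nil s
  | cons p P ih =>
      exact Cov.skip _ _ _ _ (h p List.mem_cons_self)
        (ih (fun q hq => h q (List.mem_cons_of_mem _ hq)))

theorem cov_map_cons {s s' : List Int} {P C : List (List Int)} (y : Int)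
    (h : Cov s P C) (htr : ∀ v ∈ s, y + v ∈ s') :
    Cov s' (P.map (y :: ·)) (C.map (y :: ·)) := by
  induction h generalizing s' with
  | nil => exact Cov.nil s'
  | keep s p P C _ ih =>
      refine Cov.keep _ _ _ _ (ih ?_)
      intro v hv
      rcases List.mem_cons.mp hv with h1 | h2
      · subst h1; simp [List.sum_cons]
      · exact List.mem_cons_of_mem _ (htr _ h2)
  | skip s p P C hm _ ih =>
      refine Cov.skip _ _ _ _ ?_ (ih htr)
      simpa [List.sum_cons] using htr _ hm

theorem cov_nil_left {s : List Int} {C : List (List Int)} (h : Cov s [] C) : C = [] := by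
  cases h; rfl

theorem pickEach_mem {xs : List Int} {p : Int × List Int} (h : p ∈ pickEach xs) :
    ∃ pre post, xs = pre ++ p.1 :: post ∧ p.2 = pre ++ post := by
  induction xs generalizing p with
  | nil => simp [pickEach] at h
  | cons x xs ih =>
      simp only [pickEach, List.mem_cons, List.mem_map] at h
      rcases h with h | ⟨q, hq, rfl⟩
      · exact ⟨[], xs, by simp [h]⟩
      · rcases ih hq with ⟨pre, post, h1, h2⟩
        exact ⟨x :: pre, post, by simp [h1], by simp [h2]⟩

theorem pickEach_append (A B : List Int) :
    pickEach (A ++ B) =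
      (pickEach A).map (fun p => (p.1, p.2 ++ B)) ++ (pickEach B).map (fun p => (p.1, A ++ p.2)) := by
  induction A with
  | nil => simp [pickEach]
  | cons x A ih =>
      simp [pickEach, ih, List.map_map, Function.comp_def]

theorem sublist_insert {c pre post : List Int} (y : Int) (h : c.Sublist (pre ++ post)) :
    ∃ c1 c2, c = c1 ++ c2 ∧ (c1 ++ y :: c2).Sublist (pre ++ y :: post) := by
  rcases List.sublist_append_iff.mp h with ⟨c1, c2, rfl, h1, h2⟩
  exact ⟨c1, c2, rfl, List.Sublist.append h1 (List.Sublist.cons₂ _ h2)⟩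

theorem permSum : ∀ (r : Nat) (pool q : List Int), q ∈ pyPerms pool r →
    ∃ c : List Int, c.Sublist pool ∧ c.length = r ∧ c.sum = q.sum := by
  intro r
  induction r with
  | zero =>
      intro pool q hq
      simp only [pyPerms, List.mem_singleton] at hq
      exact ⟨[], by simp, by simp, by simp [hq]⟩
  | succ r ih =>
      intro pool q hq
      simp only [pyPerms, List.mem_flatMap, List.mem_map] at hq
      rcases hq with ⟨p, hp, q', hq', rfl⟩
      rcases pickEach_mem hp with ⟨pre, post, hpool, hrest⟩
      rcases ih p.2 q' hq' with ⟨c', hsub, hlen, hsum⟩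
      rw [hrest] at hsub
      rcases sublist_insert p.1 hsub with ⟨c1, c2, rfl, hins⟩
      refine ⟨c1 ++ p.1 :: c2, by rw [hpool]; exact hins, ?_, ?_⟩
      · simp at hlen ⊢; omega
      · simp at hsum ⊢; omega

theorem combs_mem : ∀ (xs c : List Int), c.Sublist xs → c ∈ pyCombs xs c.length := by
  intro xs
  induction xs with
  | nil => intro c h; simp [List.sublist_nil.mp h, pyCombs]
  | cons x xs ih =>
      intro c h
      rcases List.sublist_cons_iff.mp h with h' | ⟨r, rfl, hr⟩
      · cases c with
        | nil => simp [pyCombs]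
        | cons a c =>
            simp only [List.length_cons, pyCombs, List.mem_append]
            exact Or.inr (ih _ h')
      · simp only [List.length_cons, pyCombs, List.mem_append, List.mem_map]
        exact Or.inl ⟨r, ih _ hr, rfl⟩

-- every selection from ext ++ zs that uses at least one element of ext has its sum in s
def Hyp (ext zs : List Int) (r : Nat) (s : List Int) : Prop :=
  ∀ c d : List Int, c.Sublist ext → d.Sublist zs → c ≠ [] → c.length + d.length = r →
    c.sum + d.sum ∈ s

theorem main_of_p (r : Nat)
    (hP : ∀ ext ws s : List Int, Hyp ext ws r s → Cov s (pyPerms (ext ++ ws) r) (pyCombs ws r)) :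
    ∀ (zs ext s : List Int), Hyp ext zs (r+1) s →
      Cov s ((pickEach zs).flatMap (fun p => (pyPerms (ext ++ p.2) r).map (p.1 :: ·)))
            (pyCombs zs (r+1)) := by
  intro zs
  induction zs with
  | nil =>
      intro ext s _
      simp only [pickEach, List.flatMap_nil, pyCombs]
      exact Cov.nil s
  | cons y ws ih =>
      intro ext s hyp
      have hsplit : (pickEach (y :: ws)).flatMap (fun p => (pyPerms (ext ++ p.2) r).map (p.1 :: ·))
          = (pyPerms (ext ++ ws) r).map (y :: ·) ++
            (pickEach ws).flatMap (fun p => (pyPerms ((ext ++ [y]) ++ p.2) r).map (p.1 :: ·)) := by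
        simp [pickEach, List.flatMap_cons, List.flatMap_map, List.append_assoc]
      rw [hsplit]
      show Cov s _ ((pyCombs ws r).map (y :: ·) ++ pyCombs ws (r+1))
      have part1 : Cov s ((pyPerms (ext ++ ws) r).map (y :: ·)) ((pyCombs ws r).map (y :: ·)) := by
        refine cov_map_cons y (hP ext ws (s.map (fun v => v - y)) ?_) ?_
        · intro c d hc hd hne hlen
          have hmem := hyp c (y :: d) hc (List.Sublist.cons₂ _ hd) hne (by simp; omega)
          refine List.mem_map.mpr ⟨c.sum + (y :: d).sum, hmem, ?_⟩
          simp; omega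
        · intro v hv
          rcases List.mem_map.mp hv with ⟨w, hw, rfl⟩
          have : y + (w - y) = w := by ring
          rw [this]; exact hw
      refine cov_append part1 ?_
      apply ih (ext ++ [y])
      intro c d hc hd hne hlen
      rcases List.sublist_append_iff.mp hc with ⟨c1, c2, rfl, hc1, hc2⟩
      rcases List.sublist_singleton.mp hc2 with rfl | rfl
      · have hc1ne : c1 ≠ [] := by simpa using hne
        have heq : (c1 ++ ([] : List Int)).sum + d.sum = c1.sum + d.sum := by simp
        rw [heq]
        exact List.mem_append_right _
          (hyp c1 d hc1 (List.Sublist.cons _ hd) hc1ne (by simp at hlen ⊢; omega))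
      · cases c1 with
        | nil =>
            have hd' : d ∈ pyCombs ws r := by
              have hlr : d.length = r := by simp at hlen; omega
              have := combs_mem ws d hd
              rwa [hlr] at this
            refine List.mem_append_left _ ?_
            have hmem : (y :: d).sum ∈ List.map List.sum ((pyCombs ws r).map (y :: ·)) :=
              List.mem_map.mpr ⟨y :: d, List.mem_map.mpr ⟨d, hd', rfl⟩, rfl⟩
            have heq : (([] : List Int) ++ [y]).sum + d.sum = (y :: d).sum := by simp
            rw [heq]; exact hmem
        | cons a c1' =>
            have hmem := hyp (a :: c1') (y :: d) hc1 (List.Sublist.cons₂ _ hd) (by simp)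
              (by simp at hlen ⊢; omega)
            have heq : ((a :: c1') ++ [y]).sum + d.sum = (a :: c1').sum + (y :: d).sum := by
              simp [List.sum_append, List.sum_cons]; ring
            rw [heq]
            exact List.mem_append_right _ hmem

theorem pmain : ∀ (r : Nat) (ext ws s : List Int), Hyp ext ws r s →
    Cov s (pyPerms (ext ++ ws) r) (pyCombs ws r) := by
  intro r
  induction r with
  | zero =>
      intro ext ws s _
      simp only [pyPerms, pyCombs]
      exact Cov.keep _ _ _ _ (Cov.nil _)
  | succ r ih =>
      intro ext ws s hyp
      have hsplit : pyPerms (ext ++ ws) (r+1)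
          = ((pickEach ext).flatMap (fun p => (pyPerms (p.2 ++ ws) r).map (p.1 :: ·))) ++
            ((pickEach ws).flatMap (fun p => (pyPerms (ext ++ p.2) r).map (p.1 :: ·))) := by
      -- split the outer loop of A by whether the first pick comes from ext or from ws
        simp only [pyPerms, pickEach_append, List.flatMap_append, List.flatMap_map]
      rw [hsplit]
      have hskip : Cov s ((pickEach ext).flatMap (fun p => (pyPerms (p.2 ++ ws) r).map (p.1 :: ·))) [] := by
        apply cov_skipAll
        intro q hq
        simp only [List.mem_flatMap, List.mem_map] at hq
        rcases hq with ⟨p, hp, q', hq', rfl⟩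
        rcases pickEach_mem hp with ⟨pre, post, hext, hrest⟩
        rcases permSum r (p.2 ++ ws) q' hq' with ⟨c', hsub, hlen, hsum⟩
        rw [hrest] at hsub
        rcases List.sublist_append_iff.mp hsub with ⟨u, d, rfl, hu, hdws⟩
        rcases sublist_insert p.1 hu with ⟨u1, u2, rfl, hins⟩
        have hmem := hyp (u1 ++ p.1 :: u2) d (by rw [hext]; exact hins) hdws (by simp)
          (by simp at hlen ⊢; omega)
        have heq : (u1 ++ p.1 :: u2).sum + d.sum = (p.1 :: q').sum := by
          simp at hsum ⊢; omega
        rwa [heq] at hmem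
      have htail := main_of_p r ih ws ext s hyp
      have := cov_append hskip (by simpa using htail)
      simpa using this

theorem cov_top (xs : List Int) (r : Nat) : Cov [] (pyPerms xs r) (pyCombs xs r) := by
  have := pmain r [] xs [] (by intro c d hc _ hne _; exact absurd (List.sublist_nil.mp hc) hne)
  simpa using this

theorem foldB_some (t : Int) : ∀ (L : List (List Int)) (d : Int) (b : List Int),
    L.foldl (bstep t) (some (d, b)) = some (fminP t d b L) := by
  intro L
  induction L with
  | nil => intro d b; simp [fminP]
  | cons c cs ih =>
      intro d b
      simp only [List.foldl_cons, bstep, fminP]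
      split_ifs with h <;> simp [ih]

theorem foldEq (t : Int) : ∀ {s : List Int} {P C : List (List Int)}, Cov s P C →
    ∀ acc : Option (Int × List Int), (∀ v ∈ s, ∃ d b, acc = some (d, b) ∧ d ≤ |v - t|) →
    P.foldl (bstep t) acc = C.foldl (bstep t) acc := by
  intro s P C h
  induction h with
  | nil => intro acc _; rfl
  | keep s p P C _ ih =>
      intro acc hacc
      simp only [List.foldl_cons]
      refine ih (bstep t acc p) ?_
      intro v hv
      rcases List.mem_cons.mp hv with rfl | hv'
      · cases acc with
        | none => exact ⟨|p.sum - t|, p, rfl, le_refl _⟩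
        | some q =>
            rcases q with ⟨bd, bc⟩
            by_cases hlt : |p.sum - t| < bd
            · exact ⟨|p.sum - t|, p, by simp [bstep, hlt], le_refl _⟩
            · exact ⟨bd, bc, by simp [bstep, hlt], by omega⟩
      · rcases hacc v hv' with ⟨bd, bc, rfl, hle⟩
        by_cases hlt : |p.sum - t| < bd
        · exact ⟨|p.sum - t|, p, by simp [bstep, hlt], by omega⟩
        · exact ⟨bd, bc, by simp [bstep, hlt], hle⟩
  | skip s p P C hm _ ih =>
      intro acc hacc
      rcases hacc _ hm with ⟨bd, bc, rfl, hle⟩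
      have hstep : bstep t (some (bd, bc)) p = some (bd, bc) := by
        have h' : ¬ |p.sum - t| < bd := by omega
        simp [bstep, h']
      simp only [List.foldl_cons, hstep]
      exact ih _ hacc

theorem loopA (t : Int) (P : List (List Int)) : ∀ (fuel j m : Nat), m < P.length →
    P.length = j + fuel →
    PySem.List.pyGetD P
      ((PySem.List.pyRange (j : Int) (((P.map List.sum).length : Nat) : Int) 1).foldl
        (fun maxpos i =>
          if |PySem.List.pyGetD (P.map List.sum) i 0 - t| <
             |PySem.List.pyGetD (P.map List.sum) maxpos 0 - t|
          then i else maxpos) (m : Int)) []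
    = (fminP t |(P.getD m []).sum - t| (P.getD m []) (P.drop j)).2 := by
  intro fuel
  induction fuel with
  | zero =>
      intro j m hm hlen
      have hj : ((P.map List.sum).length : Int) ≤ (j : Int) := by simp; omega
      rw [PySem.List.pyRange_one_eq_nil hj]
      have hdrop : P.drop j = [] := by
        apply List.drop_eq_nil_of_le; omega
      simp [hdrop, fminP_nil, PySem.List.pyGetD_natCast]
  | succ fuel ih =>
      intro j m hm hlen
      have hj : (j : Int) < ((P.map List.sum).length : Int) := by simp; omega
      have hjP : j < P.length := by omega
      rw [PySem.List.pyRange_one_cons hj]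
      have hS : ∀ k : Nat, k < P.length → (P.map List.sum).getD k 0 = (P.getD k []).sum := by
        intro k hk
        rw [List.getD_eq_getElem _ _ (by simpa using hk), List.getD_eq_getElem _ _ hk,
          List.getElem_map]
      have hdrop : P.drop j = P.getD j [] :: P.drop (j+1) := by
        rw [List.drop_eq_getElem_cons hjP, List.getD_eq_getElem _ _ hjP]
      simp only [List.foldl_cons, PySem.List.pyGetD_natCast, hS j hjP, hS m hm]
      rw [hdrop]
      rw [fminP_cons]
      have h1 : ((j : Int) + 1) = ((j + 1 : Nat) : Int) := by push_cast; ring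
      by_cases hlt : |(P.getD j []).sum - t| < |(P.getD m []).sum - t|
      · rw [if_pos hlt, if_pos hlt, h1]
        exact ih (j+1) j hjP (by omega)
      · rw [if_neg hlt, if_neg hlt, h1]
        exact ih (j+1) m hm (by omega)

-- ===== VERDICT (by name: the statement is the Claim_ definition above) =====
theorem find_closest_sum_spec : Claim_equal_find_closest_sum := by
  intro numbers target n _ _
  show find_closest_sum numbers target n = find_closest_sum_alt numbers target n
  have hcov := cov_top numbers n.toNat
  have hfold := foldEq target hcov none (by intro v hv; simp at hv)
  cases hP : pyPerms numbers n.toNat with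
  | nil =>
      have hC : pyCombs numbers n.toNat = [] := cov_nil_left (hP ▸ hcov)
      simp only [find_closest_sum, find_closest_sum_alt, hP, hC]
      norm_num [PySem.List.pyRange_one_eq_nil, PySem.List.pyGetD, PySem.List.pyGet?]
  | cons p rest =>
      have hm : 0 < (pyPerms numbers n.toNat).length := by rw [hP]; simp
      have hlen : (pyPerms numbers n.toNat).length = 1 + rest.length := by rw [hP]; simp; omega
      have hA := loopA target (pyPerms numbers n.toNat) rest.length 1 0 hm hlen
      have hget0 : (pyPerms numbers n.toNat).getD 0 [] = p := by rw [hP]; rfl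
      have hdrop1 : (pyPerms numbers n.toNat).drop 1 = rest := by rw [hP]; rfl
      rw [hget0, hdrop1] at hA
      rw [Nat.cast_one, Nat.cast_zero] at hA
      have hBfold : List.foldl (bstep target) none (pyCombs numbers n.toNat)
          = some (fminP target |p.sum - target| p rest) := by
        rw [← hfold, hP, List.foldl_cons]
        have hb : bstep target none p = some (|p.sum - target|, p) := rfl
        rw [hb, foldB_some]
      simp only [find_closest_sum, find_closest_sum_alt]
      rw [hBfold, hA]
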